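/-
  THE END THEOREM'S STATEMENT (a `def … : Prop`; the theorem itself is the last thing the proof produces).

      VorbisNeverReports im      for every input of at most 1FF000H bytes, on every processor the proof covers, at ring 0 and at
                                 ring 3: the run of `X86.run` from the start machine reaches `vorbis_exit`, and the machine is
                                 at `__asan_report` after none of the steps before
      VorbisStaysInCode im       the same, and moreover after every step before the last RIP is inside the image's code
      VorbisNeverReports.of_reachVia     the one use of the flat machine that the end theorem makes: a `ReachVia` from the start
                                 state to the exit, through states that are not at `__asan_report`, GIVES the statement

  The statement mentions: `X86.run`, `User.decoder` (= `Dec.decoder μ (Dec.mkTable X86.allRows)`, the model's real decoder),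
  `Vorbis.start` (= `User.startMachine c (Vorbis.file im inp) im.entry 800000H`, Vorbis/Start.lean), the three addresses of the
  image, and `MicroOK`. Nothing else: no user state, no `wpUser`, no shadow predicate, no contract.

  ────────────────────────────────────────────────────────────────────────────────────────────────────────────────────────
  THE PROOF, ON ONE PAGE

  0. Fix μ, c, inp. `L := startLayout c hc` (8 pages of 2 MB: user region [100000H, 1000000H), which contains the whole memory
     map of the harness). `I v := v.rip ≠ im.report`.
  1. THE STUB. `_start_vorbis` is not a function (nothing calls it, it does not return): its "contract" is
         stub_reach : ReachVia L μ I (startU im c inp) (fun v => v.rip = im.exit)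
     proved by a walk of its eleven instructions from `startU`, whose every field is known (Vorbis/Start.lean):
       a. `call run_ctors`                        by `Calls L μ I K run_ctors runCtorsSpec` (`Calls.use`). Pre: `start_image`
          (the code is in memory), `start_reg` (rsp = 800000H: 1 MB of stack, all of it with shadow 0), `start_df`,
          `start_sse_masks`, `start_covers` + `start_sealed` (the shadow invariants). Post: the cover of the live set without
          the red zones of the globals (`__asan_register_globals` poisoned them), the code and the parameter block unchanged.
       b. six 8-byte loads from 1FF000H …          `start_param` (+ the frame of a: the block is not in run_ctors' footprint)
       c. `call decode_all`                        by `Calls L μ I K decode_all decodeAllSpec`: for in = 200000H, len = the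
          input's length ≤ 1FF000H, the `len` input bytes live and readable, out = 400000H with cap = 300000H live, the arena
          800000H + 400000H wholly poisoned, the stack clean. THIS is the theorem about stb_vorbis; everything below it is the
          tree of contracts of its 116 functions, each proved by a walk with its callees' contracts as hypotheses.
       d. three 8-byte stores (1FF020H, 3FFFF8H, 1FF028H): inside L, outside the code.   e. rip = `vorbis_exit`: done.
     `I` is asked at every state stepped from: RIP is a literal there, different from `im.report`.
  2. `ReachVia.sound_rip (start_abs im c hc inp) stub_reach` turns it into the statement about `X86.run`
     (`VorbisNeverReports.of_reachVia` below does exactly this); `Abs.rip` transports RIP of the last state.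
  3. `#print axioms`: propext, Classical.choice, Quot.sound, and what X86/Derived/User/{Walk,MemPath}.lean already use.

  ────────────────────────────────────────────────────────────────────────────────────────────────────────────────────────
  IS "RIP ≠ REPORT AFTER EVERY STEP" THE RIGHT FORMALISATION OF "THE SANITIZER NEVER FIRES"?

  How a failed check manifests. Each of the twelve check routines of c/asan_rt.c is compiled to: compute, compare, `ret` on
  success; on failure `sub rsp, 8 ; mov edx, is_store ; mov esi, size ; call __asan_report` (vorbis_f.dis: the only references to
  the symbol are `call 100059`). `X86.run` counts whole instructions, so the state after that `call` has RIP = REPORT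
  exactly. A fired check IS a state of the run at REPORT, and nothing else reaches REPORT. So yes — with three remarks.

  (1) Could a failed check manifest in another way, e.g. as a fault inside the runtime? The runtime reads a shadow byte at
      C00000H + (a >> 3) only AFTER the ceiling test: the small checks reject a ≥ FFFFF0H, the range checks reject
      a ≥ 1000000H and n > 1000000H - a, both as UNSIGNED comparisons (`ja`), so a "negative" address or one ≥ 16 MB is
      reported, never dereferenced; for the addresses that pass, the shadow address is in [C00000H, E00000H), inside the
      mapped user region. (`small_bad` computes `last = addr + size - 1` before the test; it is only arithmetic.) This is not
      an assumption of the theorem: the runtime's code is walked like all other code, every load needs `L.Has`, and the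
      proof obligation could not be met otherwise. In Asan/Shadow.lean it is `Accessible.top` / `AccessibleSmall.ceiling`.
  (2) The conjunct is, strictly, implied by the first one ("reaches EXIT"): `X86.run` is a function and the code at REPORT
      ends in `hlt ; jmp` to itself, so a run that is ever at REPORT is never at EXIT afterwards. It is stated anyway because
      it makes the claim readable without knowing what the code at REPORT does.
  (3) What the statement does NOT say by itself is that no instruction FAULTED on the way: an exception is one more `.next`
      step of `X86.step` (delivery through the IDT). The start machine has no handlers (IDTR at its reset value, base 0, over
      zero memory), so a fault could hardly lead back to EXIT — but that is knowledge about the model, not in the statement. The proof shows more than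
      the statement: `User.Step` has the fault postcondition `False`, so NO step of the run raises an exception, and every
      machine of the run is in the user relation (`ReachVia.sound`). `VorbisStaysInCode` below puts the visible part of that
      into the statement at no cost to the proof (RIP is a literal at every step of a walk): after every step RIP is inside
      the image's code, so control never went to a handler. RECOMMENDED as the headline.

  And what does "no check fires" MEAN? That is outside the theorem: "no check fires ⇒ no out-of-bounds / use-after-free
  access" is the argument of the sanitizer's design, and rests on (i) gcc having put a check before every access it cannot
  prove safe (the 1,080 sites of CHECKS_f.txt), (ii) c/asan_rt.c deciding `Accessible` (proved: the contracts of the check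
  routines in Asan/ say "returns, changing nothing, iff `AccessibleSmall mem a K`; else reaches REPORT"), (iii) the shadow
  describing the objects: the start file (`initShadow`, checked against harness.py), gcc's stack and global red zones, and
  ARENA.diff's red zones around arena blocks. A too-generous poisoning would make the theorem true and say less; these three
  are what a reader inspects to know HOW MUCH safety the theorem is.

  ────────────────────────────────────────────────────────────────────────────────────────────────────────────────────────
  WHAT A READER MUST TRUST
    * the statement below, and the definitions it unfolds to:
        - the model's trusted base: `Machine`, `X86.step`, `X86.run`, `Sem` / `Sem.run`, the instruction files and their rows,
          `Dec.decoder`, the memory path (README of lean.v3);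
        - `User.startMachine` = `Boot.longModeIdent Interp.interpConfig c 16` + `Boot.loadImage` + RSP, RIP: the machine
          `interp --mode 64 --base 0x100000 --entry E --esp 0x800000` builds (`start_is_interp`, for c = 0);
        - `Vorbis.file` = `memByte` + `initShadow` + `paramWord` (Vorbis/Start.lean, 45 lines; byte-identical to harness.py's
          memory file on the inputs tried: check/);
        - the `Image` the theorem is instantiated with: its bytes are vorbis_f.bin, `imageEnd`, `entry`, `exit`, `report` are
          `__image_end`, `_start_vorbis`, `vorbis_exit`, `__asan_report` of vorbis_f.sym (`nm`);
        - `MicroOK` (= `UserX.MicroOK`, the four-field structure of UserX/MicroOK.lean — the one definition of UserX a reader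
          must read): an Intel processor whose two vendor fields agree and which enumerates SSE and SSE2.
    * Lean's kernel and the axioms `#print axioms` lists.
    NOT: X86/Derived/User (the flat machine), the rest of UserX (ReachVia, contracts, stepper, walker), Asan (shadow predicates), the decode
    facts, the invariants `VorbisOK`, the C source, gcc. If any of those were wrong the theorem would not be provable or would
    prove something true anyway: they occur in no statement.
-/
import Vorbis.Start
import UserX.ReachVia
import UserX.MicroOK
import X86.Derived.Sem.Coherent
namespace Vorbis
open X86 X86.User

/-- **What the proof assumes of the processor**: it follows Intel's manual, its two answers to "whose manual" agree
(`Microarch.Coherent`; `Microarch.ofConfig`, what every interpreter runs with, satisfies it), and it enumerates SSE and SSE2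
(the image has 1,309 SSE instructions). This IS `UserX.MicroOK` (UserX/MicroOK.lean: the one hypothesis about `μ` that every
proof of the tree carries, from which the stepper derives `SseMicro μ` and `μ.vendor = .intel`); the interpreter's processor
meets it: `UserX.microOK_interp`. -/
abbrev MicroOK (μ : Microarch) : Prop := UserX.MicroOK μ

/-- The end theorem is not vacuous in `μ`: the processor record every interpreter of the tree runs with is covered. -/
theorem microOK_interp : MicroOK (Microarch.ofConfig Interp.interpConfig) := UserX.microOK_interp

/-- The inputs the harness has room for: IN is [200000H, 3FF000H). -/
def Fits (inp : List UInt8) : Prop := inp.length ≤ 0x1FF000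

/-- **stb_vorbis never trips the address sanitizer.** For the image `im`: whatever the input, the run from the start machine
reaches the HLT of the normal exit (not yet executed), and after none of the steps before is the machine at `__asan_report`. -/
def VorbisNeverReports (im : Image) : Prop :=
  ∀ (μ : Microarch), MicroOK μ → ∀ (c : Nat), c = 0 ∨ c = 3 → ∀ (inp : List UInt8), Fits inp →
    ∃ k m', X86.run (User.decoder μ) (start im c inp) k = .next m' ∧
      m'.rip = im.exit ∧
      ∀ j, j < k → ∀ mj, X86.run (User.decoder μ) (start im c inp) j = .next mj → mj.rip ≠ im.report

/-- RIP is inside the code of the image: `[100000H, __text_end)`. -/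
def InText (im : Image) (rip : Word) : Prop := 0x100000 ≤ rip.toNat ∧ rip.toNat < im.textEnd

/-- **The stronger form**: moreover, after every step before the last, RIP is inside the image's code — control never left
the program (no exception was delivered to a handler). -/
def VorbisStaysInCode (im : Image) : Prop :=
  ∀ (μ : Microarch), MicroOK μ → ∀ (c : Nat), c = 0 ∨ c = 3 → ∀ (inp : List UInt8), Fits inp →
    ∃ k m', X86.run (User.decoder μ) (start im c inp) k = .next m' ∧
      m'.rip = im.exit ∧
      ∀ j, j < k → ∀ mj, X86.run (User.decoder μ) (start im c inp) j = .next mj → mj.rip ≠ im.report ∧ InText im mj.rip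

/-- The stronger form implies the plain one. -/
theorem VorbisStaysInCode.neverReports {im : Image} (h : VorbisStaysInCode im) : VorbisNeverReports im := by
  intro μ hμ c hc inp hfit
  obtain ⟨k, m', hrun, hexit, hvia⟩ := h μ hμ c hc inp hfit
  exact ⟨k, m', hrun, hexit, fun j hj mj hmj => (hvia j hj mj hmj).1⟩

/-- **From the flat machine to the statement.** What remains to be proved for `VorbisNeverReports im` is a `ReachVia` of the
flat user machine: from the start state to a state at the exit, through states that are not at `__asan_report`. -/
theorem VorbisNeverReports.of_reachVia (im : Image)
    (h : ∀ (μ : Microarch), MicroOK μ → ∀ (c : Nat) (hc : c = 0 ∨ c = 3) (inp : List UInt8), Fits inp →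
      ReachVia (startLayout c hc) μ (fun v => v.rip ≠ im.report) (startU im c inp) (fun v => v.rip = im.exit)) :
    VorbisNeverReports im := by
  intro μ hμ c hc inp hfit
  have hreach := h μ hμ c hc inp hfit
  obtain ⟨k, m', u', hrun, habs, hexit, _, hvia⟩ :=
    ReachVia.sound_rip (J := fun rip => rip ≠ im.report) (start_abs im c hc inp) hreach
  exact ⟨k, m', hrun, habs.rip.trans hexit, hvia⟩

/-- The same for the stronger form: the invariant of the way is "not at `__asan_report`, and inside the code". -/
theorem VorbisStaysInCode.of_reachVia (im : Image)
    (h : ∀ (μ : Microarch), MicroOK μ → ∀ (c : Nat) (hc : c = 0 ∨ c = 3) (inp : List UInt8), Fits inp →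
      ReachVia (startLayout c hc) μ (fun v => v.rip ≠ im.report ∧ InText im v.rip) (startU im c inp)
        (fun v => v.rip = im.exit)) :
    VorbisStaysInCode im := by
  intro μ hμ c hc inp hfit
  have hreach := h μ hμ c hc inp hfit
  obtain ⟨k, m', u', hrun, habs, hexit, _, hvia⟩ :=
    ReachVia.sound_rip (J := fun rip => rip ≠ im.report ∧ InText im rip) (start_abs im c hc inp) hreach
  exact ⟨k, m', hrun, habs.rip.trans hexit, hvia⟩

end Vorbis
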